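-- pv_equiv track=rewrite | github.com/dvruette/EasyDeL | easydel/inference/esurge/runners/model_runner.py | _get_token_paddings
-- ===== SOURCE A (Python) =====
-- def _get_token_paddings(min_token_size: int, max_token_size: int, padding_gap: int) -> list[int]:
--     """Generate padding sizes for efficient compilation.
--
--     Args:
--         min_token_size: Minimum token size (must be power of 2)
--         max_token_size: Maximum token size to cover
--         padding_gap: Gap between padding sizes (0 for exponential growth)
--
--     Returns:
--         List of padding sizes
--     """
--     assert (min_token_size & (min_token_size - 1) == 0) and min_token_size > 0
--     paddings = []
--     num = min_token_size
--
--     if padding_gap == 0: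
--         while num <= max_token_size:
--             paddings.append(num)
--             num *= 2
--     else:
--         while num <= padding_gap:
--             paddings.append(num)
--             num *= 2
--         num //= 2
--         while num < max_token_size:
--             num += padding_gap
--             paddings.append(num)
--
--     return paddings
-- ===== SOURCE B (Python) =====
-- def _get_token_paddings(min_token_size: int, max_token_size: int, padding_gap: int) -> list[int]:
--     """Generate padding sizes: powers of two up to a pivot, then fixed-gap steps.
--
--     Computes every entry in closed form from bit lengths instead of running
--     doubling/accumulating loops.
--     """
--     assert (min_token_size & (min_token_size - 1) == 0) and min_token_size > 0
--     e0 = min_token_size.bit_length() - 1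
--     if padding_gap == 0:
--         if max_token_size < min_token_size:
--             return []
--         return [1 << e for e in range(e0, max_token_size.bit_length())]
--     if padding_gap < min_token_size:
--         powers = []
--         pivot = min_token_size // 2
--     else:
--         e1 = padding_gap.bit_length() - 1
--         powers = [1 << e for e in range(e0, e1 + 1)]
--         pivot = 1 << e1
--     steps = max(0, -((pivot - max_token_size) // padding_gap))
--     return powers + [pivot + k * padding_gap for k in range(1, steps + 1)]
-- ===== Notes on version B (the rewrite author's own statement) =====
-- stated objective: alternative
-- what changed: B computes every padding in closed form from bit lengths (power-of-two prefix as a range of exponents, then pivot + k*gap for a count obtained by ceiling division) instead of A's mutable doubling/accumulating while-loops; Pre_ excludes non-power-of-two min_token_size (A raises AssertionError) and negative padding_gap, on which A loops forever whenever min_token_size//2 < max_token_size and returns [] otherwise only because its increasing-step loop condition fails immediately.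
-- outside the precondition, e.g. on _get_token_paddings(4, 1, -3): A returns [], B returns [-1]
import Mathlib
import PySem

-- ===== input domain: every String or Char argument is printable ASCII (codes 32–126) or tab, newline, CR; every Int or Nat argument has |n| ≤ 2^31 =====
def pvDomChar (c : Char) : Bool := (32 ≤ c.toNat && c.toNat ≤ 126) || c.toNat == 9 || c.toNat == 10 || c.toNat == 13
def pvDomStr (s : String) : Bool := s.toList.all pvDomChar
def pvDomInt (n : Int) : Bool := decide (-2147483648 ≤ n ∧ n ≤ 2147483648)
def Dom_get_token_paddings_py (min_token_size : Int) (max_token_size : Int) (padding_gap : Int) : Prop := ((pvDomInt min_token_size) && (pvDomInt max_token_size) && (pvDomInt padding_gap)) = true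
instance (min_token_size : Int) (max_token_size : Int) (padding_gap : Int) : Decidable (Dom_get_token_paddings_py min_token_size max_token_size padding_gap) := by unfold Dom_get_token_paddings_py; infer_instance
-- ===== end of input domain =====

-- B replaces A's mutable doubling/accumulating while-loops by closed-form ranges of
-- exponents (bit lengths) and a ceiling-division step count; same output, same cost.


-- ===== PORT A =====
-- `while num <= bound: paddings.append(num); num *= 2` — returns (appended list, final num).
-- The extra `0 < num` conjunct is a totality guard only: there Python's loop never terminates.
def pvLoopDouble (num bound : Int) : List Int × Int :=
  if h : num ≤ bound ∧ 0 < num then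
    let r := pvLoopDouble (num * 2) bound
    (num :: r.1, r.2)
  else ([], num)
termination_by (bound + 1 - num).toNat
decreasing_by omega

-- `while num < maxv: num += gap; paddings.append(num)` — returns the appended list.
-- The extra `0 < gap` conjunct is a totality guard only: there Python's loop never terminates.
def pvLoopAdd (num maxv gap : Int) : List Int :=
  if _h : num < maxv ∧ 0 < gap then (num + gap) :: pvLoopAdd (num + gap) maxv gap else []
termination_by (maxv - num).toNat
decreasing_by omega

def get_token_paddings_py (min_token_size : Int) (max_token_size : Int) (padding_gap : Int) : List Int :=
  if padding_gap = 0 then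
    (pvLoopDouble min_token_size max_token_size).1
  else
    let r := pvLoopDouble min_token_size padding_gap
    let num := PySem.Int.floordiv r.2 2
    r.1 ++ pvLoopAdd num max_token_size padding_gap

-- ===== PORT B =====
def get_token_paddings_py_alt (min_token_size : Int) (max_token_size : Int) (padding_gap : Int) : List Int :=
  let e0 : Int := (PySem.Int.bitLength min_token_size : Int) - 1
  if padding_gap = 0 then
    if max_token_size < min_token_size then []
    else (PySem.List.pyRange e0 (PySem.Int.bitLength max_token_size : Int) 1).map
           (fun e => (1 : Int) <<< e.toNat)
  else
    let pp : List Int × Int :=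
      if padding_gap < min_token_size then ([], PySem.Int.floordiv min_token_size 2)
      else
        let e1 : Int := (PySem.Int.bitLength padding_gap : Int) - 1
        ((PySem.List.pyRange e0 (e1 + 1) 1).map (fun e => (1 : Int) <<< e.toNat),
         (1 : Int) <<< e1.toNat)
    let steps := max 0 (-(PySem.Int.floordiv (pp.2 - max_token_size) padding_gap))
    pp.1 ++ (PySem.List.pyRange 1 (steps + 1) 1).map (fun k => pp.2 + k * padding_gap)

-- ===== PRECONDITION & SPEC =====
-- Pre_ excludes (a) non-power-of-two or nonpositive min_token_size, on which A raises
-- AssertionError, and (b) negative padding_gap, on which A loops forever whenever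
-- min_token_size // 2 < max_token_size and otherwise returns [] only because its
-- increasing-step loop condition fails immediately (outside the function's natural domain).
def Pre_get_token_paddings_py (min_token_size : Int) (max_token_size : Int) (padding_gap : Int) : Prop :=
  0 < min_token_size ∧
  min_token_size = 2 ^ (PySem.Int.bitLength min_token_size - 1) ∧
  0 ≤ padding_gap
instance (min_token_size : Int) (max_token_size : Int) (padding_gap : Int) : Decidable (Pre_get_token_paddings_py min_token_size max_token_size padding_gap) := by unfold Pre_get_token_paddings_py; infer_instance

def pvWitness_get_token_paddings_py : Int × Int × Int := (2, 100, 3)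

def Spec_get_token_paddings_py (min_token_size : Int) (max_token_size : Int) (padding_gap : Int) (out : List Int) : Prop := out = get_token_paddings_py_alt min_token_size max_token_size padding_gap
instance (min_token_size : Int) (max_token_size : Int) (padding_gap : Int) (out : List Int) : Decidable (Spec_get_token_paddings_py min_token_size max_token_size padding_gap out) := by unfold Spec_get_token_paddings_py; infer_instance

-- ===== CLAIM =====
def Claim_equal_get_token_paddings_py : Prop := ∀ (min_token_size : Int) (max_token_size : Int) (padding_gap : Int), Dom_get_token_paddings_py min_token_size max_token_size padding_gap → Pre_get_token_paddings_py min_token_size max_token_size padding_gap → Spec_get_token_paddings_py min_token_size max_token_size padding_gap (get_token_paddings_py min_token_size max_token_size padding_gap)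

-- ===== LEMMAS AND PROOFS =====

lemma pvShift_one (n : Nat) : (1 : Int) <<< ((n : Nat) : Int) = 2 ^ n := by
  have := Int.shiftLeft_natCast 1 n
  simpa [Nat.shiftLeft_eq] using this

lemma pvTwoPow_lt (e : Nat) (bound : Int) (hb : 0 < bound) (h : (2:Int)^e ≤ bound) :
    e < PySem.Int.bitLength bound := by
  have h1 := PySem.Int.lt_two_pow_bitLength bound
  have h2 : bound = (bound.natAbs : Int) := by omega
  have : (2:Int)^e < (2:Int)^(PySem.Int.bitLength bound) := by
    calc (2:Int)^e ≤ bound := h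
    _ = (bound.natAbs : Int) := h2
    _ < ((2 ^ PySem.Int.bitLength bound : Nat) : Int) := by exact_mod_cast h1
    _ = (2:Int)^(PySem.Int.bitLength bound) := by push_cast; ring
  exact (pow_lt_pow_iff_right₀ (by norm_num : (1:Int) < 2)).mp this

lemma pvbitLength_eq (e : Nat) (bound : Int) (h1 : (2:Int)^e ≤ bound) (h2 : bound < (2:Int)^(e+1)) :
    PySem.Int.bitLength bound = e + 1 := by
  have hb : 0 < bound := lt_of_lt_of_le (by positivity) h1
  have hlt := pvTwoPow_lt e bound hb h1
  have hge := PySem.Int.two_pow_bitLength_le bound (by omega)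
  have hna : (bound.natAbs : Int) = bound := by omega
  have : (2:Int)^(PySem.Int.bitLength bound - 1) ≤ bound := by
    calc (2:Int)^(PySem.Int.bitLength bound - 1)
        = ((2 ^ (PySem.Int.bitLength bound - 1) : Nat) : Int) := by push_cast; ring
      _ ≤ (bound.natAbs : Int) := by exact_mod_cast hge
      _ = bound := hna
  have : (2:Int)^(PySem.Int.bitLength bound - 1) < (2:Int)^(e+1) := lt_of_le_of_lt this h2
  have := (pow_lt_pow_iff_right₀ (by norm_num : (1:Int) < 2)).mp this
  omega

-- the doubling loop, started at 2^e ≤ bound, appends 2^e … 2^(bitLength bound − 1)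
-- and leaves num = 2^(bitLength bound)
lemma pvLoopDouble_spec : ∀ (n e : Nat) (bound : Int), 0 < bound → (2:Int)^e ≤ bound →
    n = PySem.Int.bitLength bound - e →
    pvLoopDouble ((2:Int)^e) bound =
      ((List.range' e n).map (fun i => (2:Int)^i), 2 ^ (PySem.Int.bitLength bound)) := by
  intro n
  induction n with
  | zero =>
    intro e bound hb hle hn
    exact absurd (pvTwoPow_lt e bound hb hle) (by omega)
  | succ m ih =>
    intro e bound hb hle hn
    rw [pvLoopDouble]
    have hpos : (0:Int) < 2^e := by positivity
    rw [dif_pos ⟨hle, hpos⟩]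
    have hdbl : (2:Int)^e * 2 = 2^(e+1) := by ring
    by_cases h2 : (2:Int)^(e+1) ≤ bound
    · have hlt := pvTwoPow_lt (e+1) bound hb h2
      have := ih (e+1) bound hb h2 (by omega)
      rw [hdbl, this]
      simp [List.range'_succ]
    · have hbl : PySem.Int.bitLength bound = e + 1 := pvbitLength_eq e bound hle (by omega)
      have hm : m = 0 := by omega
      subst hm
      rw [hdbl, pvLoopDouble, dif_neg (by omega), hbl]
      simp [List.range'_succ]

-- the fixed-gap loop equals the closed-form range of steps
lemma pvLoopAdd_spec : ∀ (fuel : Nat) (pivot maxv gap : Int), 0 < gap →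
    (maxv - pivot).toNat ≤ fuel →
    pvLoopAdd pivot maxv gap =
      (PySem.List.pyRange 1 (max 0 (-(PySem.Int.floordiv (pivot - maxv) gap)) + 1) 1).map
        (fun k => pivot + k * gap) := by
  intro fuel
  induction fuel with
  | zero =>
    intro pivot maxv gap hg hf
    have hpm : maxv ≤ pivot := by omega
    rw [pvLoopAdd, dif_neg (by omega)]
    have hnn : 0 ≤ PySem.Int.floordiv (pivot - maxv) gap := by
      rw [PySem.Int.floordiv_eq_ediv_of_pos hg]
      exact Int.ediv_nonneg (by omega) (by omega)
    rw [max_eq_left (by omega), PySem.List.pyRange_one_eq_nil (by omega)]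
    simp
  | succ m ih =>
    intro pivot maxv gap hg hf
    by_cases hlt : pivot < maxv
    · rw [pvLoopAdd, dif_pos ⟨hlt, hg⟩]
      have hc : PySem.Int.floordiv (pivot + gap - maxv) gap
              = PySem.Int.floordiv (pivot - maxv) gap + 1 := by
        rw [PySem.Int.floordiv_eq_ediv_of_pos hg, PySem.Int.floordiv_eq_ediv_of_pos hg]
        have : pivot + gap - maxv = (pivot - maxv) + 1 * gap := by ring
        rw [this, Int.add_mul_ediv_right _ _ (by omega : gap ≠ 0)]
      have hneg : PySem.Int.floordiv (pivot - maxv) gap < 0 := by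
        have := (PySem.Int.floordiv_lt_iff_lt_mul (a := pivot - maxv) (q := 0) hg)
        omega
      set c := PySem.Int.floordiv (pivot - maxv) gap with hcdef
      have ihr := ih (pivot + gap) maxv gap hg (by omega)
      rw [ihr, hc]
      rw [max_eq_right (by omega : (0:Int) ≤ -c)]
      rw [max_eq_right (by omega : (0:Int) ≤ -(c+1))]
      rw [show -(c+1) + 1 = -c by ring]
      rw [PySem.List.pyRange_one_cons (by omega : (1:Int) < -c + 1)]
      rw [List.map_cons]
      congr 1
      · ring
      · rw [PySem.List.pyRange_one, PySem.List.pyRange_one, List.map_map, List.map_map]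
        rw [show (-c + 1 - (1 + 1 : Int)) = (-c - 1) by ring]
        congr 1
        funext k
        simp only [Function.comp]
        push_cast
        ring
    · rw [pvLoopAdd, dif_neg (by omega)]
      have hnn : 0 ≤ PySem.Int.floordiv (pivot - maxv) gap := by
        rw [PySem.Int.floordiv_eq_ediv_of_pos hg]
        exact Int.ediv_nonneg (by omega) (by omega)
      rw [max_eq_left (by omega), PySem.List.pyRange_one_eq_nil (by omega)]
      simp

lemma pvRange_map_pow (E L : Nat) :
    (PySem.List.pyRange (E:Int) (L:Int) 1).map (fun e => (1:Int) <<< e.toNat) =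
    (List.range' E (L - E)).map (fun i => (2:Int)^i) := by
  rw [PySem.List.pyRange_one, List.map_map, List.range'_eq_map_range, List.map_map]
  rw [show ((L:Int) - (E:Int)).toNat = L - E by omega]
  congr 1
  funext k
  simp only [Function.comp]
  rw [show ((E:Int) + (k:Nat)).toNat = E + k by omega]
  exact pvShift_one (E + k)

lemma pvBL_pos (x : Int) (hx : 0 < x) : 1 ≤ PySem.Int.bitLength x := by
  have h := PySem.Int.lt_two_pow_bitLength x
  rcases Nat.eq_zero_or_pos (PySem.Int.bitLength x) with h0 | h1
  · rw [h0] at h; simp at h; omega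
  · exact h1

-- ===== VERDICT =====
theorem get_token_paddings_py_spec : Claim_equal_get_token_paddings_py := by
  intro mn mx gap _ hpre
  obtain ⟨hmn, hpow, hgap⟩ := hpre
  have hbl1 : 1 ≤ PySem.Int.bitLength mn := pvBL_pos mn hmn
  set E : Nat := PySem.Int.bitLength mn - 1 with hEdef
  have hE : mn = (2:Int)^E := hpow
  have he0 : (PySem.Int.bitLength mn : Int) - 1 = (E : Int) := by omega
  unfold Spec_get_token_paddings_py get_token_paddings_py get_token_paddings_py_alt
  simp only [he0]
  by_cases hg0 : gap = 0
  · rw [if_pos hg0, if_pos hg0]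
    by_cases hmx : mx < mn
    · rw [if_pos hmx, pvLoopDouble, dif_neg (by omega)]
    · rw [if_neg hmx, hE,
          pvLoopDouble_spec (PySem.Int.bitLength mx - E) E mx (by omega)
            (by rw [← hE]; omega) rfl,
          pvRange_map_pow]
  · rw [if_neg hg0, if_neg hg0]
    have hgpos : 0 < gap := by omega
    by_cases hlt : gap < mn
    · rw [if_pos hlt, pvLoopDouble, dif_neg (by omega)]
      simp only [List.nil_append]
      exact pvLoopAdd_spec (mx - PySem.Int.floordiv mn 2).toNat _ mx gap hgpos le_rfl
    · rw [if_neg hlt]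
      have hle : (2:Int)^E ≤ gap := by rw [← hE]; omega
      have hL1 : 1 ≤ PySem.Int.bitLength gap := pvBL_pos gap hgpos
      set L : Nat := PySem.Int.bitLength gap with hLdef
      rw [hE, pvLoopDouble_spec (L - E) E gap hgpos hle rfl]
      rw [show ((L:Int) - 1 + 1) = (L:Int) by ring]
      have hpiv : PySem.Int.floordiv ((2:Int) ^ L) 2 = (2:Int) ^ (L - 1) := by
        rw [PySem.Int.floordiv_eq_ediv_of_pos (by norm_num),
            show (2:Int)^L = (2:Int)^(L-1) * 2 by rw [← pow_succ]; congr 1; omega,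
            Int.mul_ediv_cancel _ (by norm_num)]
      have hsh : (1 : Int) <<< (((L:Int) - 1).toNat) = (2:Int) ^ (L - 1) := by
        rw [Int.shiftLeft_eq, one_mul]
        congr 1
        omega
      rw [hpiv, pvRange_map_pow, hsh]
      congr 1
      exact pvLoopAdd_spec (mx - (2:Int)^(L-1)).toNat _ mx gap hgpos le_rfl
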